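-- pv_equiv track=rewrite | github.com/Jona4325/-Tarea-03-Ejercicios-Unidad-01-B | Ejercicio 5.py | calcular_suma_anidada
-- ===== SOURCE A (Python) =====
-- def calcular_suma_anidada(a, b):
--     suma_total = 0
--     mult_count = 0
--     sum_count = 0
--     n = len(a)
--
--     for i in range(n):
--         for j in range(i + 1):
--             suma_total += a[i] * b[j]
--             mult_count += 1
--             sum_count += 1
--
--     return suma_total, mult_count, sum_count
-- ===== SOURCE B (Python) =====
-- def calcular_suma_anidada(a, b):
--     total = 0
--     prefix = 0
--     for x, y in zip(a, b):
--         prefix += y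
--         total += x * prefix
--     n = len(a)
--     count = n * (n + 1) // 2
--     return total, count, count
-- ===== Notes on version B (the rewrite author's own statement) =====
-- stated objective: faster
-- what changed: Replaces the quadratic double loop with a single pass that keeps a running prefix sum of b (total += a[i]*prefix), and computes both counters in closed form as n(n+1)/2.
import Mathlib
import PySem

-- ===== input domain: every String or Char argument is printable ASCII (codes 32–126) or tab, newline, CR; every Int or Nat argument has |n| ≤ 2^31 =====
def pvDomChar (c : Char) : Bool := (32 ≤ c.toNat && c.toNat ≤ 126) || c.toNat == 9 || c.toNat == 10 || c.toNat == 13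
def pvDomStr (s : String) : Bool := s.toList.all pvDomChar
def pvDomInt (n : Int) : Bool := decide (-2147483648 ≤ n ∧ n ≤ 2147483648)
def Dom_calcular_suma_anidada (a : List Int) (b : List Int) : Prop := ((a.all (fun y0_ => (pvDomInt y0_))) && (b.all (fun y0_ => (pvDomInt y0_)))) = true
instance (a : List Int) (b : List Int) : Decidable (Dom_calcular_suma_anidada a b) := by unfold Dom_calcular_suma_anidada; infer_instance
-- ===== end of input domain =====

-- B replaces A's double loop by a single pass keeping a running prefix sum of b,
-- with both counters computed in closed form as n*(n+1)//2.

-- ===== PORT A =====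
-- nested loops: for i in range(n): for j in range(i+1): accumulate a[i]*b[j] and
-- bump both counters; indexing via pyGetD (in range on every input Pre_ admits).
def calcular_suma_anidada (a : List Int) (b : List Int) : Int × Int × Int :=
  let n : Int := (a.length : Int)
  (PySem.List.pyRange 0 n 1).foldl
    (fun s i =>
      (PySem.List.pyRange 0 (i + 1) 1).foldl
        (fun t j =>
          (t.1 + PySem.List.pyGetD a i 0 * PySem.List.pyGetD b j 0, t.2.1 + 1, t.2.2 + 1))
        s)
    (0, 0, 0)

-- ===== PORT B =====
-- one pass over zip a b with state (prefix, total); counters in closed form.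
def calcular_suma_anidada_alt (a : List Int) (b : List Int) : Int × Int × Int :=
  let st := (a.zip b).foldl
    (fun (s : Int × Int) p => (s.1 + p.2, s.2 + p.1 * (s.1 + p.2))) (0, 0)
  let n : Int := (a.length : Int)
  let count := PySem.Int.floordiv (n * (n + 1)) 2
  (st.2, count, count)

-- ===== PRECONDITION & SPEC =====
-- A raises IndexError exactly when b is shorter than a; those inputs are excluded.
def Pre_calcular_suma_anidada (a : List Int) (b : List Int) : Prop := a.length ≤ b.length
instance (a : List Int) (b : List Int) : Decidable (Pre_calcular_suma_anidada a b) := by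
  unfold Pre_calcular_suma_anidada; infer_instance

def pvWitness_calcular_suma_anidada : List Int × List Int := ([2, -1, 3], [1, 4, -2])

def Spec_calcular_suma_anidada (a : List Int) (b : List Int) (out : Int × Int × Int) : Prop := out = calcular_suma_anidada_alt a b
instance (a : List Int) (b : List Int) (out : Int × Int × Int) : Decidable (Spec_calcular_suma_anidada a b out) := by unfold Spec_calcular_suma_anidada; infer_instance

-- ===== CLAIM (what is proved, stated in full; the proofs are below) =====
def Claim_equal_calcular_suma_anidada : Prop := ∀ (a : List Int) (b : List Int), Dom_calcular_suma_anidada a b → Pre_calcular_suma_anidada a b → Spec_calcular_suma_anidada a b (calcular_suma_anidada a b)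

-- ===== LEMMAS AND PROOFS =====

-- the common value of the weighted sum, by structural recursion on both lists
def pvG : List Int → List Int → Int
  | [], _ => 0
  | _ :: _, [] => 0
  | x :: a, y :: b => x * y + y * a.sum + pvG a b

-- B side: the zip fold from an arbitrary state
theorem pvB_fold (a b : List Int) (h : a.length ≤ b.length) (p t : Int) :
    ((a.zip b).foldl (fun (s : Int × Int) q => (s.1 + q.2, s.2 + q.1 * (s.1 + q.2))) (p, t))
      = (p + ((a.zip b).map Prod.snd).sum, t + p * a.sum + pvG a b) := by
  induction a generalizing b p t with
  | nil => simp [pvG]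
  | cons x a ih =>
    cases b with
    | nil => simp at h
    | cons y b =>
      simp only [List.length_cons, Nat.add_le_add_iff_right] at h
      simp only [List.zip_cons_cons, List.foldl_cons, List.map_cons, List.sum_cons]
      rw [ih b h]
      refine Prod.ext ?_ ?_ <;> simp [pvG] <;> ring

-- generic triple-accumulator fold over List.range
theorem pvFoldRange (n : Nat) (f g : Nat → Int) (s : Int × Int × Int) :
    (List.range n).foldl (fun (s : Int × Int × Int) k => (s.1 + f k, s.2.1 + g k, s.2.2 + g k)) s
      = (s.1 + ∑ k ∈ Finset.range n, f k, s.2.1 + ∑ k ∈ Finset.range n, g k,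
         s.2.2 + ∑ k ∈ Finset.range n, g k) := by
  induction n generalizing s with
  | zero => simp
  | succ n ih =>
    rw [List.range_succ, List.foldl_append, ih]
    simp only [List.foldl_cons, List.foldl_nil, Finset.sum_range_succ]
    refine Prod.ext (by ring) (Prod.ext (by ring) (by ring))

-- sum of getD over all indices is the list sum
theorem pvSumGetD (l : List Int) :
    ∑ k ∈ Finset.range l.length, l.getD k 0 = l.sum := by
  induction l with
  | nil => simp
  | cons x l ih =>
    rw [List.length_cons, Finset.sum_range_succ']
    simp only [List.getD_cons_succ, List.getD_cons_zero, ih, List.sum_cons]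
    ring

-- the weighted sum of A equals pvG
theorem pvA_sum (a b : List Int) (h : a.length ≤ b.length) :
    ∑ k ∈ Finset.range a.length, a.getD k 0 * ∑ j ∈ Finset.range (k + 1), b.getD j 0
      = pvG a b := by
  induction a generalizing b with
  | nil => simp [pvG]
  | cons x a ih =>
    cases b with
    | nil => simp at h
    | cons y b =>
      simp only [List.length_cons, Nat.add_le_add_iff_right] at h
      rw [List.length_cons, Finset.sum_range_succ']
      have hb : ∀ k : Nat, ∑ j ∈ Finset.range (k + 1), (y :: b).getD j 0
          = y + ∑ j ∈ Finset.range k, b.getD j 0 := by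
        intro k
        rw [Finset.sum_range_succ']; simp [add_comm]
      simp only [List.getD_cons_succ, hb]
      rw [show (∑ k ∈ Finset.range a.length,
            a.getD k 0 * (y + ∑ j ∈ Finset.range (k + 1), b.getD j 0))
          = (∑ k ∈ Finset.range a.length, a.getD k 0) * y
            + ∑ k ∈ Finset.range a.length,
                a.getD k 0 * ∑ j ∈ Finset.range (k + 1), b.getD j 0 by
        rw [Finset.sum_mul, ← Finset.sum_add_distrib]
        exact Finset.sum_congr rfl fun k _ => by ring]
      rw [pvSumGetD, ih b h]
      simp [pvG]; ring

-- inner loop of A in closed form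
theorem pvInner (a b : List Int) (k : Nat) (s : Int × Int × Int) :
    (PySem.List.pyRange 0 ((k : Int) + 1) 1).foldl
      (fun t j => (t.1 + PySem.List.pyGetD a (k : Int) 0 * PySem.List.pyGetD b j 0,
                   t.2.1 + 1, t.2.2 + 1)) s
      = (s.1 + a.getD k 0 * ∑ j ∈ Finset.range (k + 1), b.getD j 0,
         s.2.1 + ((k : Int) + 1), s.2.2 + ((k : Int) + 1)) := by
  have hr : PySem.List.pyRange 0 ((k : Int) + 1) 1
      = (List.range (k + 1)).map (fun j : Nat => (0 : Int) + j) := by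
    rw [PySem.List.pyRange_one]
    norm_num
  rw [hr, List.foldl_map]
  refine (pvFoldRange (k + 1) _ _ s).trans ?_
  refine Prod.ext (by simp [PySem.List.pyGetD_natCast, Finset.mul_sum])
    (Prod.ext (by simp) (by simp))

-- A in closed form
theorem pvA_eval (a b : List Int) :
    calcular_suma_anidada a b
      = (∑ k ∈ Finset.range a.length, a.getD k 0 * ∑ j ∈ Finset.range (k + 1), b.getD j 0,
         ∑ k ∈ Finset.range a.length, ((k : Int) + 1),
         ∑ k ∈ Finset.range a.length, ((k : Int) + 1)) := by
  simp only [calcular_suma_anidada]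
  have hr : PySem.List.pyRange 0 ((a.length : Int)) 1
      = (List.range a.length).map (fun k : Nat => (0 : Int) + k) := by
    rw [PySem.List.pyRange_one]
    norm_num
  rw [hr, List.foldl_map]
  have hstep : ∀ (s : Int × Int × Int), ∀ k ∈ List.range a.length,
      (PySem.List.pyRange 0 ((0 : Int) + (k : Int) + 1) 1).foldl
        (fun t j => (t.1 + PySem.List.pyGetD a ((0 : Int) + (k : Int)) 0 * PySem.List.pyGetD b j 0,
                     t.2.1 + 1, t.2.2 + 1)) s
      = (fun (s : Int × Int × Int) (k : Nat) =>
          (s.1 + a.getD k 0 * ∑ j ∈ Finset.range (k + 1), b.getD j 0,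
           s.2.1 + ((k : Int) + 1), s.2.2 + ((k : Int) + 1))) s k := by
    intro s k _
    simpa using pvInner a b k s
  rw [List.foldl_ext _ _ _ hstep]
  refine (pvFoldRange a.length _ _ (0, 0, 0)).trans ?_
  simp

-- Gauss: the counter in closed form
theorem pvGauss (n : Nat) :
    PySem.Int.floordiv ((n : Int) * ((n : Int) + 1)) 2
      = ∑ k ∈ Finset.range n, ((k : Int) + 1) := by
  have h2 : (∑ k ∈ Finset.range n, ((k : Int) + 1)) * 2 = (n : Int) * ((n : Int) + 1) := by
    induction n with
    | zero => simp
    | succ n ih => rw [Finset.sum_range_succ, add_mul, ih]; push_cast; ring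
  rw [← h2, PySem.Int.floordiv_eq_ediv_of_pos (by norm_num), Int.mul_ediv_cancel _ (by norm_num)]

theorem calcular_suma_anidada_spec : Claim_equal_calcular_suma_anidada := by
  intro a b _ hpre
  unfold Spec_calcular_suma_anidada
  simp only [calcular_suma_anidada_alt]
  rw [pvA_eval a b, pvB_fold a b hpre 0 0]
  rw [pvA_sum a b hpre, pvGauss a.length]
  norm_num
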